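-- pv_equiv track=rewrite | github.com/spacetelescope/roman-wfi-reference-pipeline | src/wfi_reference_pipeline/utilities/rtbdb_functions.py | make_read_pattern
-- ===== SOURCE A (Python) =====
-- def make_read_pattern(num_resultants=None, num_rds_per_res=None, uneven_spacing=False):
--     """
--     The method make_read_pattern is an RFP solution to providing a future meta data field from DMS in which a list
--     of lists will be supplied with the information about evenly spaced resultants and the indices of the reads
--     averaged together in each resultant. This method does not require access to the RTB database and can be used
--     as a standalone function for RFP development and testing mimicking future capabilities of DMS, Roman Attribute
--     Dictionary, Roman Data Models, and Romancal.
--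
--     example unevenly spaced with skips read_pattern = [[1,2], [4,5,6], [9, 10, 11,12], [13]]
--     example evenly spaced no skips read_pattern = [[1,2], [3,4], [5,6], [7,8]]
--
--     Parameters
--     ----------
--     num_resultants: integer; default=None
--         Integer number of resultants in exposure.
--     num_rds_per_res: integer; default=None
--         Integer number of reads per resultant for evenly spaced averaged resultants.
--     uneven_spacing: keyword bool; default=False
--         False assuming even spacing until spacing meta data and capabilities are available.
--         Return default sample unevenly spaced reads into resultants.
--
--     Returns
--     -------
--     read_pattern: list of lists
--         Nested list of lists that are taken created from existing meta data or accessed by new meta roman data models.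
--     """
--
--     if uneven_spacing is True:
--         # Default unevenly spaced MA table sequence for RFP development and testing.
--         read_pattern = [[1, 2], [4, 5, 6], [9, 10, 11, 12], [13]]
--     else:
--         num_resultants = num_resultants
--         num_rds_per_res = num_rds_per_res
--         rds_list = list(range(1, num_resultants*num_rds_per_res+1))
--         # Make nested list of lists read_pattern for evenly spaced resultants according to DRM, DMS, or GSFC.
--         read_pattern = [rds_list[i:i+num_resultants] for i in range(0, len(rds_list), num_resultants)]
--     return read_pattern
-- ===== SOURCE B (Python) =====
-- def make_read_pattern(num_resultants=None, num_rds_per_res=None, uneven_spacing=False):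
--     # Same hardcoded uneven-spacing default as the original.
--     if uneven_spacing is True:
--         return [[1, 2], [4, 5, 6], [9, 10, 11, 12], [13]]
--     # Even spacing: single while loop appending each chunk directly from a running
--     # start index, instead of materializing a flat range and slicing it.
--     total = num_resultants * num_rds_per_res
--     chunks = []
--     start = 1
--     while num_resultants > 0 and start <= total:
--         chunks.append(list(range(start, start + num_resultants)))
--         start += num_resultants
--     return chunks
-- ===== Notes on version B (the rewrite author's own statement) =====
-- stated objective: alternative
-- what changed: The even-spacing branch is an accumulator while-loop that appends each chunk range(start, start+n) while advancing start by n, instead of materializing the flat range(1, n*k+1) list and slicing it into chunks with a comprehension.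
-- crash fix: With even spacing and num_resultants=0 (num_rds_per_res given), A raises ValueError (range() step argument must not be zero) while B's loop guard yields no chunks and returns []. — e.g. on make_read_pattern(some 0, some 2, false): A raises ValueError, B returns []
import Mathlib
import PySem

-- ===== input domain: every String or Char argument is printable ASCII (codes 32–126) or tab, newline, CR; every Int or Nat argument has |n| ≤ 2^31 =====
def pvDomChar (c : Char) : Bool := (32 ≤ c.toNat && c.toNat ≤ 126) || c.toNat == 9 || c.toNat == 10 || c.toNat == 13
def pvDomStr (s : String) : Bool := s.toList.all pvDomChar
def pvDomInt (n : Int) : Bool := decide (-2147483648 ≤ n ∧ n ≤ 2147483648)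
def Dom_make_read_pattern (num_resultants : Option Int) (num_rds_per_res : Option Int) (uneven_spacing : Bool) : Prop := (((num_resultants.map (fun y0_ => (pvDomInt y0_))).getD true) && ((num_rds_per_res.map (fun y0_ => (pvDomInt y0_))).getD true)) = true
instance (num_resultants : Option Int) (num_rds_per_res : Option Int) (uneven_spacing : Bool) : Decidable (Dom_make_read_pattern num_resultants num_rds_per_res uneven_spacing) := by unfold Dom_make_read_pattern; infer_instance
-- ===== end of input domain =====

-- B's even-spacing branch is an accumulator while-loop appending chunk ranges from a
-- running start index instead of slicing a materialized flat range (objective: alternative).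


-- ===== PORT A =====
-- Literal port of A: build the flat list range(1, n*k+1), then slice it into chunks
-- stepping by num_resultants.  The `none` arms are the TypeError cases (excluded by Pre_).
def make_read_pattern (num_resultants : Option Int) (num_rds_per_res : Option Int) (uneven_spacing : Bool) : List (List Int) :=
  if uneven_spacing = true then
    [[1, 2], [4, 5, 6], [9, 10, 11, 12], [13]]
  else
    match num_resultants, num_rds_per_res with
    | some n, some k =>
      let rds_list := PySem.List.pyRange 1 (n * k + 1) 1
      (PySem.List.pyRange 0 (rds_list.length : Int) n).map
        (fun i => PySem.List.slice rds_list (some i) (some (i + n)))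
    | _, _ => []  -- Python raises TypeError here; excluded by Pre_

-- ===== PORT B =====
-- B's while loop: `while n > 0 and start <= total: chunks.append(range(start, start+n)); start += n`.
def altLoop (n total start : Int) (chunks : List (List Int)) : List (List Int) :=
  if 0 < n ∧ start ≤ total then
    altLoop n total (start + n) (chunks ++ [PySem.List.pyRange start (start + n) 1])
  else chunks
termination_by (total + 1 - start).toNat
decreasing_by omega

def make_read_pattern_alt (num_resultants : Option Int) (num_rds_per_res : Option Int) (uneven_spacing : Bool) : List (List Int) :=
  if uneven_spacing = true then
    [[1, 2], [4, 5, 6], [9, 10, 11, 12], [13]]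
  else
    match num_resultants, num_rds_per_res with
    | some n, some k => altLoop n (n * k) 1 []
    | none, _ => []  -- Python raises TypeError here; excluded by Pre_
    | some _, none => []  -- Python raises TypeError here; excluded by Pre_

-- ===== PRECONDITION & SPEC =====
-- Pre_ excludes exactly the inputs where A raises: with even spacing, a missing
-- count raises TypeError and num_resultants == 0 raises ValueError (range step 0).
def Pre_make_read_pattern (num_resultants : Option Int) (num_rds_per_res : Option Int) (uneven_spacing : Bool) : Prop :=
  uneven_spacing = true ∨
    (num_resultants.isSome = true ∧ num_rds_per_res.isSome = true ∧ num_resultants ≠ some 0)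
instance (num_resultants : Option Int) (num_rds_per_res : Option Int) (uneven_spacing : Bool) : Decidable (Pre_make_read_pattern num_resultants num_rds_per_res uneven_spacing) := by unfold Pre_make_read_pattern; infer_instance

def pvWitness_make_read_pattern : Option Int × Option Int × Bool := (some 2, some 3, false)

-- With even spacing, num_resultants == 0 (and num_rds_per_res given) makes A raise
-- ValueError (range step 0); B's loop guard simply produces no chunks and returns [].
def Raises_make_read_pattern (num_resultants : Option Int) (num_rds_per_res : Option Int) (uneven_spacing : Bool) : Prop :=
  uneven_spacing = false ∧ num_resultants = some 0 ∧ num_rds_per_res.isSome = true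
instance (num_resultants : Option Int) (num_rds_per_res : Option Int) (uneven_spacing : Bool) : Decidable (Raises_make_read_pattern num_resultants num_rds_per_res uneven_spacing) := by unfold Raises_make_read_pattern; infer_instance
def pvRaiseWitness_make_read_pattern : Option Int × Option Int × Bool := (some 0, some 2, false)
def pvRaiseWitnessOut_make_read_pattern : List (List Int) := []

def Spec_make_read_pattern (num_resultants : Option Int) (num_rds_per_res : Option Int) (uneven_spacing : Bool) (out : List (List Int)) : Prop := out = make_read_pattern_alt num_resultants num_rds_per_res uneven_spacing
instance (num_resultants : Option Int) (num_rds_per_res : Option Int) (uneven_spacing : Bool) (out : List (List Int)) : Decidable (Spec_make_read_pattern num_resultants num_rds_per_res uneven_spacing out) := by unfold Spec_make_read_pattern; infer_instance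

-- ===== CLAIM (what is proved, stated in full; the proofs are below) =====
def Claim_equal_make_read_pattern : Prop := ∀ (num_resultants : Option Int) (num_rds_per_res : Option Int) (uneven_spacing : Bool), Dom_make_read_pattern num_resultants num_rds_per_res uneven_spacing → Pre_make_read_pattern num_resultants num_rds_per_res uneven_spacing → Spec_make_read_pattern num_resultants num_rds_per_res uneven_spacing (make_read_pattern num_resultants num_rds_per_res uneven_spacing)

def Claim_raises_make_read_pattern : Prop := (∀ (num_resultants : Option Int) (num_rds_per_res : Option Int) (uneven_spacing : Bool), Dom_make_read_pattern num_resultants num_rds_per_res uneven_spacing → Raises_make_read_pattern num_resultants num_rds_per_res uneven_spacing → ¬ Pre_make_read_pattern num_resultants num_rds_per_res uneven_spacing) ∧ (Dom_make_read_pattern (pvRaiseWitness_make_read_pattern.1) (pvRaiseWitness_make_read_pattern.2.1) (pvRaiseWitness_make_read_pattern.2.2) ∧ Raises_make_read_pattern (pvRaiseWitness_make_read_pattern.1) (pvRaiseWitness_make_read_pattern.2.1) (pvRaiseWitness_make_read_pattern.2.2) ∧ make_read_pattern_alt (pvRaiseWitness_make_read_pattern.1) (pvRaiseWitness_make_read_pattern.2.1)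 (pvRaiseWitness_make_read_pattern.2.2) = pvRaiseWitnessOut_make_read_pattern)

-- ===== LEMMAS AND PROOFS =====

-- B's loop from start = n'*t+1: appends the chunks for rows t, t+1, …, k'-1.
lemma altLoop_eq (n' k' : Nat) (hn : 0 < n') :
    ∀ (d t : Nat) (acc : List (List Int)), t + d = k' →
    altLoop (n' : Int) ((n' : Int) * (k' : Int)) ((n' : Int) * (t : Int) + 1) acc
      = acc ++ (List.range' t d).map
          (fun s : Nat => PySem.List.pyRange ((n' : Int) * (s : Int) + 1) ((n' : Int) * (s : Int) + (n' : Int) + 1) 1) := by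
  intro d
  induction d with
  | zero =>
    intro t acc ht
    have htk : (t : Int) = (k' : Int) := by exact_mod_cast (by omega : t = k')
    rw [altLoop, if_neg (by rw [htk]; intro ⟨_, h⟩; linarith)]
    simp
  | succ d ih =>
    intro t acc ht
    rw [altLoop]
    have hn' : (0 : Int) < (n' : Int) := by exact_mod_cast hn
    have hcond : ((0 : Int) < (n' : Int) ∧ (n' : Int) * (t : Int) + 1 ≤ (n' : Int) * ((k' : Nat) : Int)) := by
      refine ⟨hn', ?_⟩
      have : (t : Int) + 1 ≤ (k' : Int) := by exact_mod_cast (by omega : t + 1 ≤ k')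
      nlinarith
    rw [if_pos hcond]
    have hstep : (n' : Int) * (t : Int) + 1 + (n' : Int) = (n' : Int) * (((t + 1 : Nat)) : Int) + 1 := by
      push_cast; ring
    rw [hstep, ih (t + 1) _ (by omega), List.range'_succ, List.map_cons]
    simp only [List.append_assoc, List.singleton_append]
    have hb : ((n' : Int) * (((t + 1 : Nat)) : Int) + 1) = (n' : Int) * (t : Int) + (n' : Int) + 1 := by
      push_cast; ring
    rw [hb]

-- One slice of A's flat list equals the chunk range for row t.
lemma chunk_eq (n' k' t : Nat) (hn : 0 < n') (ht : t < k') :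
    PySem.List.slice (PySem.List.pyRange 1 ((n' : Int) * (k' : Int) + 1) 1)
      (some ((n' : Int) * (t : Int))) (some ((n' : Int) * (t : Int) + (n' : Int)))
    = PySem.List.pyRange ((n' : Int) * (t : Int) + 1) ((n' : Int) * (t : Int) + (n' : Int) + 1) 1 := by
  have hcnt : ((n' : Int) * (k' : Int) + 1 - 1).toNat = n' * k' := by
    have h1 : (n' : Int) * (k' : Int) + 1 - 1 = ((n' * k' : Nat) : Int) := by push_cast; ring
    rw [h1, Int.toNat_natCast]
  have hflat : PySem.List.pyRange 1 ((n' : Int) * (k' : Int) + 1) 1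
      = (List.range (n' * k')).map (fun j : Nat => 1 + (j : Int)) := by
    rw [PySem.List.pyRange_one, hcnt]
  have hrhs : PySem.List.pyRange ((n' : Int) * (t : Int) + 1) ((n' : Int) * (t : Int) + (n' : Int) + 1) 1
      = (List.range n').map (fun j : Nat => ((n' : Int) * (t : Int) + 1) + (j : Int)) := by
    rw [PySem.List.pyRange_one]
    congr 1
    have h1 : (n' : Int) * (t : Int) + (n' : Int) + 1 - ((n' : Int) * (t : Int) + 1) = ((n' : Nat) : Int) := by ring
    rw [h1, Int.toNat_natCast]
  have hcast2 : (n' : Int) * (t : Int) + (n' : Int) = ((n' * t : Nat) : Int) + ((n' : Nat) : Int) := by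
    rw [Nat.cast_mul]
  have hcast : (n' : Int) * (t : Int) = ((n' * t : Nat) : Int) := (Nat.cast_mul n' t).symm
  rw [hflat, hrhs, hcast2, hcast, PySem.List.slice_natCast_add]
  have hle : n' * t + n' ≤ n' * k' := by
    calc n' * t + n' = n' * (t + 1) := by ring
    _ ≤ n' * k' := Nat.mul_le_mul_left n' ht
  apply List.ext_getElem
  · simp; omega
  · intro j h1 h2
    simp only [List.getElem_take, List.getElem_drop, List.getElem_map, List.getElem_range]
    push_cast
    ring

-- The even branch with positive counts: A's slicing equals B's loop.
lemma even_pos_eq (n k : Int) (hn : 0 < n) (hk : 0 < k) :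
    (PySem.List.pyRange 0 (((PySem.List.pyRange 1 (n * k + 1) 1).length : Nat) : Int) n).map
        (fun i => PySem.List.slice (PySem.List.pyRange 1 (n * k + 1) 1) (some i) (some (i + n)))
    = altLoop n (n * k) 1 [] := by
  lift n to Nat using hn.le with n'
  lift k to Nat using hk.le with k'
  have hn' : 0 < n' := by exact_mod_cast hn
  have hk' : 0 < k' := by exact_mod_cast hk
  have hlen : (PySem.List.pyRange 1 ((n' : Int) * (k' : Int) + 1) 1).length = n' * k' := by
    rw [PySem.List.length_pyRange_one]
    have h1 : (n' : Int) * (k' : Int) + 1 - 1 = ((n' * k' : Nat) : Int) := by push_cast; ring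
    rw [h1, Int.toNat_natCast]
  rw [hlen]
  have hdiv : (((n' * k' : Nat) : Int) - 0 + (n' : Int) - 1) / (n' : Int) = ((k' : Nat) : Int) := by
    have h1 : ((n' * k' : Nat) : Int) - 0 + (n' : Int) - 1 = ((n' * k' + n' - 1 : Nat) : Int) := by
      push_cast [Nat.one_le_iff_ne_zero.mpr hn'.ne']
      omega
    rw [h1, ← Int.natCast_ediv]
    congr 1
    have h2 : n' * k' + n' - 1 = n' * k' + (n' - 1) := by omega
    rw [h2, Nat.mul_add_div hn', Nat.div_eq_of_lt (by omega)]
    omega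
  have hcount : PySem.List.pyRange 0 ((n' * k' : Nat) : Int) (n' : Int)
      = (List.range k').map (fun t : Nat => 0 + (n' : Int) * (t : Int)) := by
    rw [PySem.List.pyRange_of_pos 0 _ (by exact_mod_cast hn')]
    have hpos : (0 : Int) < ((n' * k' : Nat) : Int) := by
      exact_mod_cast Nat.mul_pos hn' hk'
    rw [if_pos hpos, hdiv, Int.toNat_natCast]
  have halt : altLoop (n' : Int) ((n' : Int) * (k' : Int)) 1 []
      = (List.range' 0 k').map
          (fun s : Nat => PySem.List.pyRange ((n' : Int) * (s : Int) + 1) ((n' : Int) * (s : Int) + (n' : Int) + 1) 1) := by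
    have h := altLoop_eq n' k' hn' k' 0 [] (by omega)
    simpa using h
  rw [hcount, List.map_map, halt, List.range_eq_range']
  apply List.map_congr_left
  intro t htmem
  have ht : t < k' := by have := (List.mem_range'_1.mp htmem).2; omega
  simp only [Function.comp, zero_add]
  exact chunk_eq n' k' t hn' ht

-- pyRange with negative step from 0 up to a nonnegative stop is empty.
lemma pyRange_neg_step_nil (b s : Int) (hb : 0 ≤ b) (hs : s < 0) :
    PySem.List.pyRange 0 b s = [] := by
  simp [PySem.List.pyRange, hs.ne, not_lt_of_ge hb, if_neg (by omega : ¬ (0:Int) < s)]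

-- B's loop halts immediately when the guard fails.
lemma altLoop_base (n total start : Int) (h : ¬ (0 < n ∧ start ≤ total)) :
    altLoop n total start [] = [] := by
  rw [altLoop, if_neg h]

-- ===== VERDICT (by name: the statement is the Claim_ definition above) =====
theorem make_read_pattern_spec : Claim_equal_make_read_pattern := by
  intro nr kr u _hDom hPre
  unfold Spec_make_read_pattern make_read_pattern make_read_pattern_alt
  by_cases hu : u = true
  · simp [hu]
  · simp only [hu, if_false, Bool.false_eq_true]
    rcases hPre with h | ⟨hs1, hs2, hne⟩
    · exact absurd h hu
    · obtain ⟨n, rfl⟩ := Option.isSome_iff_exists.mp hs1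
      obtain ⟨k, rfl⟩ := Option.isSome_iff_exists.mp hs2
      have hn0 : n ≠ 0 := fun h => hne (by rw [h])
      simp only
      rcases lt_trichotomy n 0 with hn | hn | hn
      · rw [pyRange_neg_step_nil _ _ (by exact_mod_cast Nat.zero_le _) hn]
        rw [altLoop_base _ _ _ (by omega)]
        simp
      · exact absurd hn hn0
      · by_cases hk : 0 < k
        · exact even_pos_eq n k hn hk
        · have hnil : PySem.List.pyRange 1 (n * k + 1) 1 = [] :=
            PySem.List.pyRange_one_eq_nil (by nlinarith)
          rw [hnil, altLoop_base _ _ _ (by intro ⟨_, h⟩; nlinarith)]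
          simp [PySem.List.pyRange, hn.ne']

@[simp] theorem make_read_pattern_raises : Claim_raises_make_read_pattern := by
  unfold Claim_raises_make_read_pattern
  constructor
  · intro nr kr u _hDom ⟨hu, hn, _⟩ hPre
    rcases hPre with h | ⟨_, _, hne⟩
    · rw [hu] at h; exact Bool.false_ne_true h
    · exact hne hn
  · refine ⟨by decide, by decide, ?_⟩
    show make_read_pattern_alt (some 0) (some 2) false = []
    show altLoop 0 (0 * 2) 1 [] = []
    rw [altLoop_base _ _ _ (by omega)]
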